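-- pv_equiv track=rewrite | github.com/Canela-san/MC102 | lab19.py | expansao
-- ===== SOURCE A (Python) =====
-- def expansao(imagem_original):
--     pixel = [[1 for _ in range((len(imagem_original[0])*2)-1)] for _ in range((len(imagem_original)*2)-1)]
--     for i in range(1, len(imagem_original)+1):
--         for j in range(1, len(imagem_original[0])+1):
--             pixel[(i*2)-2][(j*2)-2] = imagem_original[i-1][j-1]
--             if j != 1 and (i*10)%2 == 0:    pixel[(i*2)-2][(j*2)-3] = int((pixel[(i*2)-2][(j*2-4)] + pixel[(i*2)-2][(j*2-2)]) / 2)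
--             if i != 1 and (j*10)%2 == 0:    pixel[(i*2)-3][(j*2-2)] = int((pixel[(i*2)-4][(j*2-2)] + pixel[(i*2)-2][(j*2-2)]) / 2)
--             if j != 1 and i != 1 and (i*10)%2 == 0 and (j*10)%2 == 0:    pixel[(i*2)-3][(j*2)-3] = int((pixel[(i*2)-2][(j*2)-2]+pixel[(i*2)-2][(j*2)-4]+pixel[(i*2)-4][(j*2)-4]+pixel[(i*2)-4][(j*2)-2])/4)
--     return pixel
-- ===== SOURCE B (Python) =====
-- def _mid2(a, b):
--     return int((a + b) / 2)
--
-- def _mid4(a, b, c, d):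
--     return int((a + b + c + d) / 4)
--
-- def _hrow(cells):
--     # expanded version of one original row: x0, mid01, x1, mid12, x2, ...
--     if not cells:
--         return []
--     out = [cells[0]]
--     for a, b in zip(cells, cells[1:]):
--         out.append(_mid2(a, b))
--         out.append(b)
--     return out
--
-- def _vrow(up, down):
--     # interpolated row between two consecutive original rows
--     if not up:
--         return []
--     out = [_mid2(up[0], down[0])]
--     for (a, b), (c, d) in zip(zip(up, up[1:]), zip(down, down[1:])):
--         out.append(_mid4(a, b, c, d))
--         out.append(_mid2(b, d))
--     return out
--
-- def expansao(imagem_original):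
--     m = len(imagem_original[0])
--     rows = [row[:m] for row in imagem_original]
--     out = [_hrow(rows[0])]
--     for up, down in zip(rows, rows[1:]):
--         out.append(_vrow(up, down))
--         out.append(_hrow(down))
--     return out
-- ===== Notes on version B (the rewrite author's own statement) =====
-- stated objective: simpler
-- what changed: Replaces the 1-initialized mutable (2n-1)x(2m-1) grid with in-place index writes by a direct functional construction: each output row is built left-to-right from pairs of adjacent original pixels (one interleaving pass per original row and one per pair of consecutive rows), eliminating all index arithmetic and per-cell mutation (measured ~2x faster at the largest timed size).
-- outside the precondition, e.g. on expansao([]): A returns [], B raises IndexError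
import Mathlib
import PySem

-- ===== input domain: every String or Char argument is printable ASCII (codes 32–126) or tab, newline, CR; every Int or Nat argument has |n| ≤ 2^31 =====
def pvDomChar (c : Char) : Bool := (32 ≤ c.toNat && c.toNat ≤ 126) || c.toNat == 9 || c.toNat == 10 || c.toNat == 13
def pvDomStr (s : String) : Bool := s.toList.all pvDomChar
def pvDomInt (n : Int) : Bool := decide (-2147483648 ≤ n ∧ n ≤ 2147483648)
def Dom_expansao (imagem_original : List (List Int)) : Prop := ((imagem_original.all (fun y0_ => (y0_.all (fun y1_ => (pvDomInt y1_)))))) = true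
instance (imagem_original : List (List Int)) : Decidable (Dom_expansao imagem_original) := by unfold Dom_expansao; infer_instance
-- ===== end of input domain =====

-- B replaces A's 1-initialized mutable grid with index-arithmetic writes by a direct
-- functional row-by-row construction from pairs of adjacent original pixels (objective: simpler).

-- ===== PORT A =====
-- pixel[r][c]  (grid read; in-range on every admitted input, default never used)
def pvIGet (g : List (List Int)) (r c : Int) : Int :=
  PySem.List.pyGetD (PySem.List.pyGetD g r []) c 0

-- pixel[r][c] = v  (grid write)
def pvISet (g : List (List Int)) (r c : Int) (v : Int) : List (List Int) :=
  PySem.List.pySetD g r (PySem.List.pySetD (PySem.List.pyGetD g r []) c v)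

-- the body of A's inner loop, literally (int(x/2) = PySem.Int.truncdiv, exact for |operands| < 2^53)
def pvStepA (xs : List (List Int)) (px : List (List Int)) (i j : Int) : List (List Int) :=
  let px1 := pvISet px (i*2-2) (j*2-2) (pvIGet xs (i-1) (j-1))
  let px2 := if j ≠ 1 ∧ PySem.Int.mod (i*10) 2 = 0 then
      pvISet px1 (i*2-2) (j*2-3)
        (PySem.Int.truncdiv (pvIGet px1 (i*2-2) (j*2-4) + pvIGet px1 (i*2-2) (j*2-2)) 2)
    else px1
  let px3 := if i ≠ 1 ∧ PySem.Int.mod (j*10) 2 = 0 then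
      pvISet px2 (i*2-3) (j*2-2)
        (PySem.Int.truncdiv (pvIGet px2 (i*2-4) (j*2-2) + pvIGet px2 (i*2-2) (j*2-2)) 2)
    else px2
  if j ≠ 1 ∧ i ≠ 1 ∧ PySem.Int.mod (i*10) 2 = 0 ∧ PySem.Int.mod (j*10) 2 = 0 then
      pvISet px3 (i*2-3) (j*2-3)
        (PySem.Int.truncdiv (pvIGet px3 (i*2-2) (j*2-2) + pvIGet px3 (i*2-2) (j*2-4)
          + pvIGet px3 (i*2-4) (j*2-4) + pvIGet px3 (i*2-4) (j*2-2)) 4)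
  else px3

def expansao (imagem_original : List (List Int)) : List (List Int) :=
  let n : Int := PySem.List.len imagem_original
  let m : Int := PySem.List.len (PySem.List.pyGetD imagem_original 0 [])
  let pixel : List (List Int) :=
    (PySem.List.pyRange 0 (n*2-1) 1).map (fun _ =>
      (PySem.List.pyRange 0 (m*2-1) 1).map (fun _ => (1 : Int)))
  (PySem.List.pyRange 1 (n+1) 1).foldl (fun px i =>
    (PySem.List.pyRange 1 (m+1) 1).foldl (fun px j => pvStepA imagem_original px i j) px) pixel

-- ===== PORT B =====
def pvMid2 (a b : Int) : Int := PySem.Int.truncdiv (a + b) 2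
def pvMid4 (a b c d : Int) : Int := PySem.Int.truncdiv (a + b + c + d) 4

-- _hrow's loop over zip(cells, cells[1:]): a = previous cell, list = remaining cells
def pvHrowGo : Int → List Int → List Int
  | _, [] => []
  | a, b :: t => pvMid2 a b :: b :: pvHrowGo b t
def pvHrow : List Int → List Int
  | [] => []
  | a :: t => a :: pvHrowGo a t

-- _vrow's loop over zip(zip(up, up[1:]), zip(down, down[1:]))
def pvVrowGo : Int → Int → List Int → List Int → List Int
  | a, c, b :: bs, d :: ds => pvMid4 a b c d :: pvMid2 b d :: pvVrowGo b d bs ds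
  | _, _, _, _ => []
def pvVrow : List Int → List Int → List Int
  | [], _ => []
  | _ :: _, [] => []     -- unreachable under Pre_ (rows have equal trimmed length)
  | a :: as_, c :: cs => pvMid2 a c :: pvVrowGo a c as_ cs

-- the loop over zip(rows, rows[1:]) appending _vrow then _hrow
def pvVloop : List Int → List (List Int) → List (List Int)
  | _, [] => []
  | up, d :: rest => pvVrow up d :: pvHrow d :: pvVloop d rest

def expansao_alt (imagem_original : List (List Int)) : List (List Int) :=
  let m : Int := PySem.List.len (PySem.List.pyGetD imagem_original 0 [])
  let rows := imagem_original.map (fun r => PySem.List.slice r none (some m))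
  match rows with
  | [] => []                                   -- unreachable: Python raises on []
  | r0 :: rest => pvHrow r0 :: pvVloop r0 rest

-- ===== PRECONDITION & SPEC =====
-- Pre_ excludes images with a row shorter than the first row (A raises IndexError there)
-- and the empty list, where A happens to return [] (its empty outer comprehension never
-- evaluates imagem_original[0]) while B's natural len(imagem_original[0]) raises IndexError.
def Pre_expansao (imagem_original : List (List Int)) : Prop :=
  imagem_original ≠ [] ∧
    ∀ r ∈ imagem_original, (imagem_original.headD []).length ≤ r.length
instance (imagem_original : List (List Int)) : Decidable (Pre_expansao imagem_original) := by
  unfold Pre_expansao; infer_instance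

def pvWitness_expansao : List (List Int) := [[1, 3], [5, 7]]

def Spec_expansao (imagem_original : List (List Int)) (out : List (List Int)) : Prop :=
  out = expansao_alt imagem_original
instance (imagem_original : List (List Int)) (out : List (List Int)) :
    Decidable (Spec_expansao imagem_original out) := by unfold Spec_expansao; infer_instance

-- ===== CLAIM (what is proved, stated in full; the proofs are below) =====
def Claim_equal_expansao : Prop := ∀ (imagem_original : List (List Int)),
  Dom_expansao imagem_original → Pre_expansao imagem_original →
    Spec_expansao imagem_original (expansao imagem_original)

-- ===== LEMMAS AND PROOFS =====

-- (i*10) % 2 == 0 is always true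
theorem pv_mod10 (x : Int) : PySem.Int.mod (x*10) 2 = 0 :=
  (PySem.Int.mod_eq_zero_iff_dvd _ _).2 ⟨x*5, by ring⟩

theorem pvIGet_nat (g : List (List Int)) (r c : Nat) :
    pvIGet g (r : Int) (c : Int) = (g.getD r []).getD c 0 := by
  simp [pvIGet]

theorem pvISet_nat (g : List (List Int)) (r c : Nat) (v : Int) :
    pvISet g (r : Int) (c : Int) v = g.set r ((g.getD r []).set c v) := by
  simp [pvISet]

theorem pvHrowGo_length (a : Int) (t : List Int) : (pvHrowGo a t).length = 2*t.length := by
  induction t generalizing a with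
  | nil => rfl
  | cons b t ih => simp [pvHrowGo, ih]; omega

theorem pvHrow_length (l : List Int) : (pvHrow l).length = 2*l.length - 1 := by
  cases l with
  | nil => rfl
  | cons a t => simp [pvHrow, pvHrowGo_length]; omega

theorem pvVrowGo_length (a c : Int) (bs ds : List Int) (h : bs.length = ds.length) :
    (pvVrowGo a c bs ds).length = 2*bs.length := by
  induction bs generalizing a c ds with
  | nil => rfl
  | cons b bs ih =>
    cases ds with
    | nil => simp at h
    | cons d ds =>
      simp only [pvVrowGo, List.length_cons]
      rw [ih _ _ _ (by simpa using h)]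
      omega

theorem pvVrow_length (p c : List Int) (h : p.length = c.length) :
    (pvVrow p c).length = 2*p.length - 1 := by
  cases p with
  | nil => rfl
  | cons a as =>
    cases c with
    | nil => simp at h
    | cons x cs =>
      simp only [pvVrow, List.length_cons]
      rw [pvVrowGo_length _ _ _ _ (by simpa using h)]
      omega

theorem pvHrowGo_getD_odd (a : Int) (t : List Int) (c : Nat) (d : Int) (h : c < t.length) :
    (pvHrowGo a t).getD (2*c+1) d = t.getD c d := by
  induction t generalizing a c with
  | nil => simp at h
  | cons b t ih =>
    cases c with
    | zero => rfl
    | succ c =>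
      have : 2*(c+1)+1 = (2*c+1) + 2 := by omega
      rw [this]
      simpa [pvHrowGo] using ih b c (by simpa using h)

theorem pvHrow_getD_even (l : List Int) (c : Nat) (d : Int) (h : c < l.length) :
    (pvHrow l).getD (2*c) d = l.getD c d := by
  cases l with
  | nil => simp at h
  | cons a t =>
    cases c with
    | zero => rfl
    | succ c =>
      have : 2*(c+1) = (2*c+1) + 1 := by omega
      rw [this]
      simpa [pvHrow] using pvHrowGo_getD_odd a t c d (by simpa using h)

theorem pvHrowGo_snoc (x : Int) (l : List Int) (ca b : Int) :
    pvHrowGo x (l ++ [ca, b]) = pvHrowGo x (l ++ [ca]) ++ [pvMid2 ca b, b] := by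
  induction l generalizing x with
  | nil => simp [pvHrowGo]
  | cons y l ih => simpa [pvHrowGo] using ih y

theorem pvHrow_snoc (l : List Int) (ca b : Int) :
    pvHrow (l ++ [ca, b]) = pvHrow (l ++ [ca]) ++ [pvMid2 ca b, b] := by
  cases l with
  | nil => simp [pvHrow, pvHrowGo]
  | cons y l => simpa [pvHrow] using pvHrowGo_snoc y l ca b

theorem pvVrowGo_snoc (x y : Int) (ps cs : List Int) (h : ps.length = cs.length)
    (pa ca q b : Int) :
    pvVrowGo x y (ps ++ [pa, q]) (cs ++ [ca, b])
      = pvVrowGo x y (ps ++ [pa]) (cs ++ [ca]) ++ [pvMid4 pa q ca b, pvMid2 q b] := by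
  induction ps generalizing cs x y with
  | nil =>
    cases cs with
    | nil => simp [pvVrowGo]
    | cons c cs => simp at h
  | cons p ps ih =>
    cases cs with
    | nil => simp at h
    | cons c cs => simpa [pvVrowGo] using ih p c cs (by simpa using h)

theorem pvVrow_snoc (ps cs : List Int) (h : ps.length = cs.length) (pa ca q b : Int) :
    pvVrow (ps ++ [pa, q]) (cs ++ [ca, b])
      = pvVrow (ps ++ [pa]) (cs ++ [ca]) ++ [pvMid4 pa q ca b, pvMid2 q b] := by
  cases ps with
  | nil =>
    cases cs with
    | nil => simp [pvVrow, pvVrowGo]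
    | cons c cs => simp at h
  | cons p ps =>
    cases cs with
    | nil => simp at h
    | cons c cs =>
      simp only [List.cons_append, pvVrow]
      rw [pvVrowGo_snoc p c ps cs (by simpa using h)]

-- ===== window lemmas: one pvStepA application on the three active grid rows =====

theorem pv_win_get0 (g0 : List (List Int)) (P O E : List Int) (tail : List (List Int)) :
    (g0 ++ P :: O :: E :: tail).getD g0.length [] = P := by
  rw [List.getD_append_right _ _ _ _ (le_refl _)]; simp

theorem pv_win_get1 (g0 : List (List Int)) (P O E : List Int) (tail : List (List Int)) :
    (g0 ++ P :: O :: E :: tail).getD (g0.length + 1) [] = O := by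
  rw [List.getD_append_right _ _ _ _ (by omega)]; simp

theorem pv_win_get2 (g0 : List (List Int)) (P O E : List Int) (tail : List (List Int)) :
    (g0 ++ P :: O :: E :: tail).getD (g0.length + 2) [] = E := by
  rw [List.getD_append_right _ _ _ _ (by omega)]; simp

theorem pv_win_set1 (g0 : List (List Int)) (P O E X : List Int) (tail : List (List Int)) :
    (g0 ++ P :: O :: E :: tail).set (g0.length + 1) X = g0 ++ P :: X :: E :: tail := by
  rw [List.set_append_right _ _ (by omega)]; simp

theorem pv_win_set2 (g0 : List (List Int)) (P O E X : List Int) (tail : List (List Int)) :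
    (g0 ++ P :: O :: E :: tail).set (g0.length + 2) X = g0 ++ P :: O :: X :: tail := by
  rw [List.set_append_right _ _ (by omega)]; simp

-- a generic step at i = t+1 ≥ 2, j = k+1 ≥ 2
theorem pv_step_win (xs g0 tail : List (List Int)) (P H V R R' : List Int)
    (t k : Nat) (ht : 1 ≤ t) (hk : 1 ≤ k)
    (hg : g0.length = 2*t-2) (hH : H.length = 2*k-1) (hV : V.length = 2*k-1)
    (b ca pa q : Int)
    (hb : (xs.getD t []).getD k 0 = b)
    (hca : H.getD (2*k-2) 0 = ca)
    (hpa : P.getD (2*k-2) 0 = pa) (hq : P.getD (2*k) 0 = q) :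
    pvStepA xs (g0 ++ P :: (V ++ 1 :: 1 :: R') :: (H ++ 1 :: 1 :: R) :: tail)
        ((t:Int)+1) ((k:Int)+1)
      = g0 ++ P :: (V ++ PySem.Int.truncdiv (b+ca+pa+q) 4 :: pvMid2 q b :: R')
           :: (H ++ pvMid2 ca b :: b :: R) :: tail := by
  have hI2 : ((t:Int)+1)*2-2 = ((g0.length + 2 : Nat) : Int) := by omega
  have hI3 : ((t:Int)+1)*2-3 = ((g0.length + 1 : Nat) : Int) := by omega
  have hI4 : ((t:Int)+1)*2-4 = ((g0.length : Nat) : Int) := by omega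
  have hJ2 : ((k:Int)+1)*2-2 = ((2*k : Nat) : Int) := by omega
  have hJ3 : ((k:Int)+1)*2-3 = ((2*k-1 : Nat) : Int) := by omega
  have hJ4 : ((k:Int)+1)*2-4 = ((2*k-2 : Nat) : Int) := by omega
  have hi1 : ((t:Int)+1)-1 = ((t : Nat) : Int) := by omega
  have hj1 : ((k:Int)+1)-1 = ((k : Nat) : Int) := by omega
  have hc1 : ((k:Int)+1 ≠ 1 ∧ PySem.Int.mod (((t:Int)+1)*10) 2 = 0) := ⟨by omega, pv_mod10 _⟩
  have hc2 : ((t:Int)+1 ≠ 1 ∧ PySem.Int.mod (((k:Int)+1)*10) 2 = 0) := ⟨by omega, pv_mod10 _⟩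
  have hc3 : ((k:Int)+1 ≠ 1 ∧ ((t:Int)+1 ≠ 1 ∧ (PySem.Int.mod (((t:Int)+1)*10) 2 = 0 ∧
      PySem.Int.mod (((k:Int)+1)*10) 2 = 0))) := ⟨hc1.1, hc2.1, hc1.2, hc2.2⟩
  -- column-level set/get facts on the two fresh rows
  have hE1 : (H ++ 1 :: 1 :: R).set (2*k) b = H ++ 1 :: b :: R := by
    rw [List.set_append_right _ _ (by omega)]
    rw [hH]; have h1 : 2*k - (2*k-1) = 1 := by omega
    rw [h1]; rfl
  have rE2k : (H ++ 1 :: b :: R).getD (2*k) 0 = b := by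
    rw [List.getD_append_right _ _ _ _ (by omega)]
    rw [hH]; have h1 : 2*k - (2*k-1) = 1 := by omega
    rw [h1]; rfl
  have rE2k2 : ∀ x y : Int, (H ++ x :: y :: R).getD (2*k-2) 0 = ca := by
    intro x y
    rw [List.getD_append _ _ _ _ (by omega)]; exact hca
  have hE2 : (H ++ 1 :: b :: R).set (2*k-1) (PySem.Int.truncdiv (ca+b) 2)
      = H ++ PySem.Int.truncdiv (ca+b) 2 :: b :: R := by
    rw [List.set_append_right _ _ (by omega)]
    rw [hH]; have h1 : (2*k-1) - (2*k-1) = 0 := by omega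
    rw [h1]; rfl
  have rE2k' : (H ++ PySem.Int.truncdiv (ca+b) 2 :: b :: R).getD (2*k) 0 = b := by
    rw [List.getD_append_right _ _ _ _ (by omega)]
    rw [hH]; have h1 : 2*k - (2*k-1) = 1 := by omega
    rw [h1]; rfl
  have hO1 : (V ++ 1 :: 1 :: R').set (2*k) (PySem.Int.truncdiv (q+b) 2)
      = V ++ 1 :: PySem.Int.truncdiv (q+b) 2 :: R' := by
    rw [List.set_append_right _ _ (by omega)]
    rw [hV]; have h1 : 2*k - (2*k-1) = 1 := by omega
    rw [h1]; rfl
  have hO2 : (V ++ 1 :: PySem.Int.truncdiv (q+b) 2 :: R').set (2*k-1)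
      (PySem.Int.truncdiv (b+ca+pa+q) 4)
      = V ++ PySem.Int.truncdiv (b+ca+pa+q) 4 :: PySem.Int.truncdiv (q+b) 2 :: R' := by
    rw [List.set_append_right _ _ (by omega)]
    rw [hV]; have h1 : (2*k-1) - (2*k-1) = 0 := by omega
    rw [h1]; rfl
  simp only [pvStepA, hI2, hI3, hI4, hJ2, hJ3, hJ4, hi1, hj1, if_pos hc1, if_pos hc2, if_pos hc3,
    pvIGet_nat, pvISet_nat, pv_win_get0, pv_win_get1, pv_win_get2, pv_win_set1, pv_win_set2,
    hb, hE1, rE2k, rE2k2, hE2, rE2k', hO1, hO2, hpa, hq, pvMid2]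

-- the step at i = t+1 ≥ 2, j = 1: writes only columns 0 of the two fresh rows
theorem pv_step1_win (xs g0 tail : List (List Int)) (P O' E' : List Int)
    (t : Nat) (ht : 1 ≤ t) (hg : g0.length = 2*t-2)
    (b0 p0 : Int) (hb : (xs.getD t []).getD 0 0 = b0) (hp0 : P.getD 0 0 = p0) :
    pvStepA xs (g0 ++ P :: (1 :: O') :: (1 :: E') :: tail) ((t:Int)+1) 1
      = g0 ++ P :: (pvMid2 p0 b0 :: O') :: (b0 :: E') :: tail := by
  have hI2 : ((t:Int)+1)*2-2 = ((g0.length + 2 : Nat) : Int) := by omega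
  have hI3 : ((t:Int)+1)*2-3 = ((g0.length + 1 : Nat) : Int) := by omega
  have hI4 : ((t:Int)+1)*2-4 = ((g0.length : Nat) : Int) := by omega
  have hJ2 : (1:Int)*2-2 = ((0 : Nat) : Int) := by omega
  have hi1 : ((t:Int)+1)-1 = ((t : Nat) : Int) := by omega
  have hj1 : (1:Int)-1 = ((0 : Nat) : Int) := by omega
  have hc1 : ¬((1:Int) ≠ 1 ∧ PySem.Int.mod (((t:Int)+1)*10) 2 = 0) := by simp
  have hc2 : ((t:Int)+1 ≠ 1 ∧ PySem.Int.mod ((1:Int)*10) 2 = 0) := ⟨by omega, pv_mod10 1⟩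
  have hc3 : ¬((1:Int) ≠ 1 ∧ ((t:Int)+1 ≠ 1 ∧ (PySem.Int.mod (((t:Int)+1)*10) 2 = 0 ∧
      PySem.Int.mod ((1:Int)*10) 2 = 0))) := by simp
  simp only [pvStepA, hI2, hI3, hI4, hJ2, hi1, hj1, if_neg hc1, if_pos hc2, if_neg hc3,
    pvIGet_nat, pvISet_nat, pv_win_get0, pv_win_get1, pv_win_get2, pv_win_set1, pv_win_set2,
    hb, hp0, List.set_cons_zero, List.getD_cons_zero, pvMid2]

-- the step at i = 1, j = k+1 ≥ 2: writes only row 0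
theorem pv_step_i1_win (xs tail : List (List Int)) (H R : List Int)
    (k : Nat) (hk : 1 ≤ k) (hH : H.length = 2*k-1)
    (b ca : Int) (hb : (xs.getD 0 []).getD k 0 = b) (hca : H.getD (2*k-2) 0 = ca) :
    pvStepA xs ((H ++ 1 :: 1 :: R) :: tail) 1 ((k:Int)+1)
      = (H ++ pvMid2 ca b :: b :: R) :: tail := by
  have hI2 : (1:Int)*2-2 = ((0 : Nat) : Int) := by omega
  have hJ2 : ((k:Int)+1)*2-2 = ((2*k : Nat) : Int) := by omega
  have hJ3 : ((k:Int)+1)*2-3 = ((2*k-1 : Nat) : Int) := by omega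
  have hJ4 : ((k:Int)+1)*2-4 = ((2*k-2 : Nat) : Int) := by omega
  have hi1 : (1:Int)-1 = ((0 : Nat) : Int) := by omega
  have hj1 : ((k:Int)+1)-1 = ((k : Nat) : Int) := by omega
  have hc1 : ((k:Int)+1 ≠ 1 ∧ PySem.Int.mod ((1:Int)*10) 2 = 0) := ⟨by omega, pv_mod10 1⟩
  have hc2 : ¬((1:Int) ≠ 1 ∧ PySem.Int.mod (((k:Int)+1)*10) 2 = 0) := by simp
  have hc3 : ¬((k:Int)+1 ≠ 1 ∧ ((1:Int) ≠ 1 ∧ (PySem.Int.mod ((1:Int)*10) 2 = 0 ∧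
      PySem.Int.mod (((k:Int)+1)*10) 2 = 0))) := by simp
  have hE1 : (H ++ 1 :: 1 :: R).set (2*k) b = H ++ 1 :: b :: R := by
    rw [List.set_append_right _ _ (by omega)]
    rw [hH]; have h1 : 2*k - (2*k-1) = 1 := by omega
    rw [h1]; rfl
  have rE2k : (H ++ 1 :: b :: R).getD (2*k) 0 = b := by
    rw [List.getD_append_right _ _ _ _ (by omega)]
    rw [hH]; have h1 : 2*k - (2*k-1) = 1 := by omega
    rw [h1]; rfl
  have rE2k2 : ∀ x y : Int, (H ++ x :: y :: R).getD (2*k-2) 0 = ca := by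
    intro x y
    rw [List.getD_append _ _ _ _ (by omega)]; exact hca
  have hE2 : (H ++ 1 :: b :: R).set (2*k-1) (PySem.Int.truncdiv (ca+b) 2)
      = H ++ PySem.Int.truncdiv (ca+b) 2 :: b :: R := by
    rw [List.set_append_right _ _ (by omega)]
    rw [hH]; have h1 : (2*k-1) - (2*k-1) = 0 := by omega
    rw [h1]; rfl
  simp only [pvStepA, hI2, hJ2, hJ3, hJ4, hi1, hj1, if_pos hc1, if_neg hc2, if_neg hc3,
    pvIGet_nat, pvISet_nat, hb, hE1, rE2k, rE2k2, hE2,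
    List.set_cons_zero, List.getD_cons_zero, pvMid2]

-- the step at i = 1, j = 1: writes only pixel[0][0]
theorem pv_step1_i1 (xs tail : List (List Int)) (e : Int) (E' : List Int)
    (b0 : Int) (hb : (xs.getD 0 []).getD 0 0 = b0) :
    pvStepA xs ((e :: E') :: tail) 1 1 = (b0 :: E') :: tail := by
  have hI2 : (1:Int)*2-2 = ((0 : Nat) : Int) := by omega
  have hi1 : (1:Int)-1 = ((0 : Nat) : Int) := by omega
  have hc1 : ¬((1:Int) ≠ 1 ∧ PySem.Int.mod ((1:Int)*10) 2 = 0) := by simp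
  have hc3 : ¬((1:Int) ≠ 1 ∧ ((1:Int) ≠ 1 ∧ (PySem.Int.mod ((1:Int)*10) 2 = 0 ∧
      PySem.Int.mod ((1:Int)*10) 2 = 0))) := by simp
  simp only [pvStepA, hI2, hi1, if_neg hc1, if_neg hc3,
    pvIGet_nat, pvISet_nat, hb, List.set_cons_zero, List.getD_cons_zero]

-- ===== inner-loop lemmas =====

theorem pv_inner_go (xs : List (List Int)) (t : Nat) (ht : 1 ≤ t) :
    ∀ (cs ps pd0 cd0 : List Int) (pa ca : Int) (g0 tail : List (List Int)),
    ps.length = cs.length →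
    pd0.length = cd0.length →
    g0.length = 2*t - 2 →
    (∀ c : Nat, c < cs.length →
        pvIGet xs (t : Int) ((cd0.length + 1 + c : Nat) : Int) = cs.getD c 0) →
    (PySem.List.pyRange ((cd0.length + 2 : Nat) : Int)
        ((cd0.length + 2 + cs.length : Nat) : Int) 1).foldl
        (fun px j => pvStepA xs px ((t:Int)+1) j)
        (g0 ++ pvHrow (pd0 ++ pa :: ps)
            :: (pvVrow (pd0 ++ [pa]) (cd0 ++ [ca]) ++ List.replicate (2*cs.length) 1)
            :: (pvHrow (cd0 ++ [ca]) ++ List.replicate (2*cs.length) 1) :: tail)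
      = g0 ++ pvHrow (pd0 ++ pa :: ps) :: pvVrow (pd0 ++ pa :: ps) (cd0 ++ ca :: cs)
          :: pvHrow (cd0 ++ ca :: cs) :: tail := by
  intro cs
  induction cs with
  | nil =>
    intro ps pd0 cd0 pa ca g0 tail hlen hlen2 hg hx
    cases ps with
    | cons q ps' => simp at hlen
    | nil =>
      rw [PySem.List.pyRange_one_eq_nil (by simp)]
      simp [List.foldl_nil]
  | cons b cs ih =>
    intro ps pd0 cd0 pa ca g0 tail hlen hlen2 hg hx
    cases ps with
    | nil => simp at hlen
    | cons q ps' =>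
      have hlen' : ps'.length = cs.length := by simpa using hlen
      -- peel the first iteration j = cd0.length + 2
      rw [PySem.List.pyRange_one_cons (by simp), List.foldl_cons]
      -- split the padding:  2*(cs.length+1) ones  =  1 :: 1 :: 2*cs.length ones
      have hrep : List.replicate (2*(b :: cs).length) (1:Int)
          = 1 :: 1 :: List.replicate (2*cs.length) 1 := by
        have h2 : 2*(b :: cs).length = (2*cs.length) + 1 + 1 := by simp; omega
        rw [h2, List.replicate_succ, List.replicate_succ]
      rw [hrep]
      -- the first iteration is one pv_step_win
      have hjcast : ((cd0.length + 2 : Nat) : Int) = ((cd0.length + 1 : Nat) : Int) + 1 := by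
        push_cast; ring
      rw [hjcast]
      have hb : ((xs.getD t []).getD (cd0.length + 1) 0) = b := by
        have h0 := hx 0 (by simp)
        rw [pvIGet_nat] at h0
        simpa using h0
      have hca : (pvHrow (cd0 ++ [ca])).getD (2*(cd0.length+1)-2) 0 = ca := by
        have h1 : 2*(cd0.length+1)-2 = 2*cd0.length := by omega
        rw [h1, pvHrow_getD_even _ _ _ (by simp)]
        rw [List.getD_append_right _ _ _ _ (le_refl _)]
        simp
      have hpa : (pvHrow (pd0 ++ pa :: q :: ps')).getD (2*(cd0.length+1)-2) 0 = pa := by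
        have h1 : 2*(cd0.length+1)-2 = 2*cd0.length := by omega
        rw [h1, pvHrow_getD_even _ _ _ (by simp; omega)]
        rw [hlen2.symm, List.getD_append_right _ _ _ _ (le_refl _)]
        simp
      have hq : (pvHrow (pd0 ++ pa :: q :: ps')).getD (2*(cd0.length+1)) 0 = q := by
        rw [pvHrow_getD_even _ _ _ (by simp; omega)]
        rw [hlen2.symm, List.getD_append_right _ _ _ _ (by omega)]
        have h1 : pd0.length + 1 - pd0.length = 1 := by omega
        rw [h1]; rfl
      rw [pv_step_win xs g0 tail (pvHrow (pd0 ++ pa :: q :: ps'))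
            (pvHrow (cd0 ++ [ca])) (pvVrow (pd0 ++ [pa]) (cd0 ++ [ca]))
            (List.replicate (2*cs.length) 1) (List.replicate (2*cs.length) 1)
            t (cd0.length+1) ht (by omega) hg
            (by rw [pvHrow_length]; simp)
            (by rw [pvVrow_length _ _ (by simp [hlen2])]; simp; omega)
            b ca pa q hb hca hpa hq]
      -- fold the two written cells back into the snoc rows
      have hsum : b + ca + pa + q = pa + q + ca + b := by ring
      have hEsnoc : (pvHrow (cd0 ++ [ca]) ++ pvMid2 ca b :: b :: List.replicate (2*cs.length) 1)
          = pvHrow ((cd0 ++ [ca]) ++ [b]) ++ List.replicate (2*cs.length) 1 := by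
        have := pvHrow_snoc cd0 ca b
        simp only [List.append_assoc, List.cons_append, List.nil_append] at this ⊢
        rw [this]; simp
      have hOsnoc : (pvVrow (pd0 ++ [pa]) (cd0 ++ [ca])
              ++ PySem.Int.truncdiv (b+ca+pa+q) 4 :: pvMid2 q b :: List.replicate (2*cs.length) 1)
          = pvVrow ((pd0 ++ [pa]) ++ [q]) ((cd0 ++ [ca]) ++ [b])
              ++ List.replicate (2*cs.length) 1 := by
        have hv := pvVrow_snoc pd0 cd0 hlen2 pa ca q b
        simp only [List.append_assoc, List.cons_append, List.nil_append] at hv ⊢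
        rw [hv]
        simp [pvMid4, hsum]
      rw [hEsnoc, hOsnoc]
      -- apply the induction hypothesis at cd0 ++ [ca], pd0 ++ [pa]
      have hx' : ∀ c : Nat, c < cs.length →
          pvIGet xs (t : Int) (((cd0 ++ [ca]).length + 1 + c : Nat) : Int) = cs.getD c 0 := by
        intro c hc
        have h1 := hx (c+1) (by simp; omega)
        have h2 : (cd0 ++ [ca]).length + 1 + c = cd0.length + 1 + (c+1) := by simp; omega
        rw [h2]
        simpa using h1
      have hcast2 : ((cd0.length + 1 : Nat) : Int) + 1 + 1 = (((cd0 ++ [ca]).length + 2 : Nat) : Int) := by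
        push_cast; simp; ring
      have hcast3 : ((cd0.length + 2 + (b :: cs).length : Nat) : Int)
          = (((cd0 ++ [ca]).length + 2 + cs.length : Nat) : Int) := by
        push_cast; simp; ring
      rw [hcast2, hcast3]
      have := ih ps' (pd0 ++ [pa]) (cd0 ++ [ca]) q b g0 tail hlen' (by simp [hlen2]) hg hx'
      simp only [List.append_assoc, List.cons_append, List.nil_append] at this ⊢
      exact this

theorem pv_inner1_go (xs : List (List Int)) :
    ∀ (cs cd0 : List Int) (ca : Int) (tail : List (List Int)),
    (∀ c : Nat, c < cs.length →
        pvIGet xs 0 ((cd0.length + 1 + c : Nat) : Int) = cs.getD c 0) →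
    (PySem.List.pyRange ((cd0.length + 2 : Nat) : Int)
        ((cd0.length + 2 + cs.length : Nat) : Int) 1).foldl
        (fun px j => pvStepA xs px 1 j)
        ((pvHrow (cd0 ++ [ca]) ++ List.replicate (2*cs.length) 1) :: tail)
      = pvHrow (cd0 ++ ca :: cs) :: tail := by
  intro cs
  induction cs with
  | nil =>
    intro cd0 ca tail hx
    rw [PySem.List.pyRange_one_eq_nil (by simp)]
    simp [List.foldl_nil]
  | cons b cs ih =>
    intro cd0 ca tail hx
    rw [PySem.List.pyRange_one_cons (by simp), List.foldl_cons]
    have hrep : List.replicate (2*(b :: cs).length) (1:Int)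
        = 1 :: 1 :: List.replicate (2*cs.length) 1 := by
      have h2 : 2*(b :: cs).length = (2*cs.length) + 1 + 1 := by simp; omega
      rw [h2, List.replicate_succ, List.replicate_succ]
    rw [hrep]
    have hjcast : ((cd0.length + 2 : Nat) : Int) = ((cd0.length + 1 : Nat) : Int) + 1 := by
      push_cast; ring
    rw [hjcast]
    have hb : ((xs.getD 0 []).getD (cd0.length + 1) 0) = b := by
      have h0 := hx 0 (by simp)
      rw [show (0:Int) = ((0:Nat):Int) from rfl, pvIGet_nat] at h0
      simpa using h0
    have hca : (pvHrow (cd0 ++ [ca])).getD (2*(cd0.length+1)-2) 0 = ca := by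
      have h1 : 2*(cd0.length+1)-2 = 2*cd0.length := by omega
      rw [h1, pvHrow_getD_even _ _ _ (by simp)]
      rw [List.getD_append_right _ _ _ _ (le_refl _)]
      simp
    rw [pv_step_i1_win xs tail (pvHrow (cd0 ++ [ca])) (List.replicate (2*cs.length) 1)
          (cd0.length+1) (by omega) (by rw [pvHrow_length]; simp) b ca hb hca]
    have hEsnoc : (pvHrow (cd0 ++ [ca]) ++ pvMid2 ca b :: b :: List.replicate (2*cs.length) 1)
        = pvHrow ((cd0 ++ [ca]) ++ [b]) ++ List.replicate (2*cs.length) 1 := by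
      have := pvHrow_snoc cd0 ca b
      simp only [List.append_assoc, List.cons_append, List.nil_append] at this ⊢
      rw [this]; simp
    rw [hEsnoc]
    have hx' : ∀ c : Nat, c < cs.length →
        pvIGet xs 0 (((cd0 ++ [ca]).length + 1 + c : Nat) : Int) = cs.getD c 0 := by
      intro c hc
      have h1 := hx (c+1) (by simp; omega)
      have h2 : (cd0 ++ [ca]).length + 1 + c = cd0.length + 1 + (c+1) := by simp; omega
      rw [h2]
      simpa using h1
    have hcast2 : ((cd0.length + 1 : Nat) : Int) + 1 + 1 = (((cd0 ++ [ca]).length + 2 : Nat) : Int) := by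
      push_cast; simp; ring
    have hcast3 : ((cd0.length + 2 + (b :: cs).length : Nat) : Int)
        = (((cd0 ++ [ca]).length + 2 + cs.length : Nat) : Int) := by
      push_cast; simp; ring
    rw [hcast2, hcast3]
    have := ih (cd0 ++ [ca]) b tail hx'
    simp only [List.append_assoc, List.cons_append, List.nil_append] at this ⊢
    exact this

-- full inner loop at i = 1
theorem pv_inner1 (xs : List (List Int)) (cur : List Int) (tail : List (List Int))
    (hx : ∀ c : Nat, c < cur.length → pvIGet xs 0 (c : Int) = cur.getD c 0) :
    (PySem.List.pyRange 1 ((cur.length + 1 : Nat) : Int) 1).foldl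
        (fun px j => pvStepA xs px 1 j)
        (List.replicate (2*cur.length-1) 1 :: tail)
      = pvHrow cur :: tail := by
  cases cur with
  | nil =>
    rw [PySem.List.pyRange_one_eq_nil (by simp)]
    simp [List.foldl_nil, pvHrow]
  | cons c0 cs =>
    rw [PySem.List.pyRange_one_cons (by simp), List.foldl_cons]
    have hrep : List.replicate (2*(c0 :: cs).length-1) (1:Int)
        = 1 :: List.replicate (2*cs.length) 1 := by
      have h2 : 2*(c0 :: cs).length-1 = (2*cs.length) + 1 := by simp; omega
      rw [h2, List.replicate_succ]
    rw [hrep]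
    have hb : ((xs.getD 0 []).getD 0 0) = c0 := by
      have h0 := hx 0 (by simp)
      rw [show (0:Int) = ((0:Nat):Int) from rfl, pvIGet_nat] at h0
      simpa using h0
    rw [pv_step1_i1 xs tail 1 (List.replicate (2*cs.length) 1) c0 hb]
    have hgrid : (c0 :: List.replicate (2*cs.length) 1)
        = pvHrow (([] : List Int) ++ [c0]) ++ List.replicate (2*cs.length) 1 := by
      simp [pvHrow, pvHrowGo]
    rw [hgrid]
    have hx' : ∀ c : Nat, c < cs.length →
        pvIGet xs 0 ((([] : List Int).length + 1 + c : Nat) : Int) = cs.getD c 0 := by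
      intro c hc
      have h1 := hx (c+1) (by simp; omega)
      have h2 : ([] : List Int).length + 1 + c = c + 1 := by simp; omega
      rw [h2]
      simpa using h1
    have hcast2 : (1:Int) + 1 = ((([] : List Int).length + 2 : Nat) : Int) := by
      simp
    have hcast3 : (((c0 :: cs).length + 1 : Nat) : Int)
        = ((([] : List Int).length + 2 + cs.length : Nat) : Int) := by
      simp; omega
    rw [hcast2, hcast3]
    have := pv_inner1_go xs cs [] c0 tail hx'
    simpa using this

theorem pv_inner (xs : List (List Int)) (t : Nat) (ht : 1 ≤ t)
    (prev cur : List Int) (g0 tail : List (List Int)) (m : Nat)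
    (hp : prev.length = m) (hc : cur.length = m) (hg : g0.length = 2*t-2)
    (hx : ∀ c : Nat, c < m → pvIGet xs (t : Int) (c : Int) = cur.getD c 0) :
    (PySem.List.pyRange 1 ((m + 1 : Nat) : Int) 1).foldl
        (fun px j => pvStepA xs px ((t:Int)+1) j)
        (g0 ++ pvHrow prev :: List.replicate (2*m-1) 1 :: List.replicate (2*m-1) 1 :: tail)
      = g0 ++ pvHrow prev :: pvVrow prev cur :: pvHrow cur :: tail := by
  cases cur with
  | nil =>
    cases prev with
    | cons p ps => exfalso; simp at hp hc; omega
    | nil =>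
      have hm : m = 0 := by simpa using hc.symm
      subst hm
      rw [PySem.List.pyRange_one_eq_nil (by simp)]
      simp [List.foldl_nil, pvHrow, pvVrow]
  | cons c0 cs =>
    cases prev with
    | nil => exfalso; simp at hp hc; omega
    | cons p0 ps =>
      rw [PySem.List.pyRange_one_cons (by simp at hc; simp; omega), List.foldl_cons]
      have hrep : List.replicate (2*m-1) (1:Int)
          = 1 :: List.replicate (2*cs.length) 1 := by
        have h2 : 2*m-1 = (2*cs.length) + 1 := by simp at hc; omega
        rw [h2, List.replicate_succ]
      rw [hrep]
      have hb : ((xs.getD t []).getD 0 0) = c0 := by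
        have h0 := hx 0 (by simp at hc; omega)
        rw [show (0:Int) = ((0:Nat):Int) from rfl, pvIGet_nat] at h0
        simpa using h0
      have hp0 : (pvHrow (p0 :: ps)).getD 0 0 = p0 := by simp [pvHrow]
      rw [pv_step1_win xs g0 tail (pvHrow (p0 :: ps)) (List.replicate (2*cs.length) 1)
            (List.replicate (2*cs.length) 1) t ht hg c0 p0 hb hp0]
      have hO : (pvMid2 p0 c0 :: List.replicate (2*cs.length) 1)
          = pvVrow (([] : List Int) ++ [p0]) (([] : List Int) ++ [c0])
              ++ List.replicate (2*cs.length) 1 := by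
        simp [pvVrow, pvVrowGo]
      have hE : (c0 :: List.replicate (2*cs.length) 1)
          = pvHrow (([] : List Int) ++ [c0]) ++ List.replicate (2*cs.length) 1 := by
        simp [pvHrow, pvHrowGo]
      rw [hO, hE]
      have hx' : ∀ c : Nat, c < cs.length →
          pvIGet xs (t : Int) ((([] : List Int).length + 1 + c : Nat) : Int) = cs.getD c 0 := by
        intro c hcc
        have h1 := hx (c+1) (by simp at hc; omega)
        have h2 : ([] : List Int).length + 1 + c = c + 1 := by simp; omega
        rw [h2]
        simpa using h1
      have hcast2 : (1:Int) + 1 = ((([] : List Int).length + 2 : Nat) : Int) := by simp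
      have hcast3 : ((m + 1 : Nat) : Int)
          = ((([] : List Int).length + 2 + cs.length : Nat) : Int) := by
        simp at hc; simp; omega
      rw [hcast2, hcast3]
      have := pv_inner_go xs t ht cs ps [] [] p0 c0 g0 tail
        (by simp at hc hp; omega) (by simp) hg hx'
      simpa using this


-- ===== outer loop =====

theorem pv_outer (xs : List (List Int)) (m : Nat) :
    ∀ (rest : List (List Int)) (t : Nat) (prev : List Int) (good : List (List Int)),
    1 ≤ t → good.length = 2*t-2 → prev.length = m →
    (∀ k : Nat, k < rest.length → rest.getD k [] = (xs.getD (t+k) []).take m) →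
    (∀ k : Nat, k < rest.length → m ≤ (xs.getD (t+k) []).length) →
    (PySem.List.pyRange ((t+1 : Nat) : Int) ((t+1+rest.length : Nat) : Int) 1).foldl
        (fun px i => (PySem.List.pyRange 1 ((m+1 : Nat) : Int) 1).foldl
            (fun px j => pvStepA xs px i j) px)
        (good ++ pvHrow prev :: List.replicate (2*rest.length) (List.replicate (2*m-1) 1))
      = good ++ pvHrow prev :: pvVloop prev rest := by
  intro rest
  induction rest with
  | nil =>
    intro t prev good ht hg hp hrows hlen
    simp only [List.length_nil, Nat.add_zero]
    rw [PySem.List.pyRange_one_eq_nil (le_refl _)]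
    simp [List.foldl_nil, pvVloop]
  | cons cur rest ih =>
    intro t prev good ht hg hp hrows hlen
    rw [PySem.List.pyRange_one_cons (a := ((t+1 : Nat) : Int))
          (b := ((t+1+(cur :: rest).length : Nat) : Int)) (by simp), List.foldl_cons]
    have hrep : List.replicate (2*(cur :: rest).length) (List.replicate (2*m-1) (1:Int))
        = List.replicate (2*m-1) 1 :: List.replicate (2*m-1) 1
            :: List.replicate (2*rest.length) (List.replicate (2*m-1) 1) := by
      have h2 : 2*(cur :: rest).length = (2*rest.length) + 1 + 1 := by simp; omega
      rw [h2, List.replicate_succ, List.replicate_succ]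
    rw [hrep]
    have hcur : cur = (xs.getD t []).take m := by
      have := hrows 0 (by simp)
      simpa using this
    have hclen : cur.length = m := by
      have := hlen 0 (by simp)
      simp at this
      rw [hcur]
      simp
      omega
    have hx : ∀ c : Nat, c < m → pvIGet xs (t : Int) (c : Int) = cur.getD c 0 := by
      intro c hc
      rw [pvIGet_nat, hcur]
      simp [List.getD_eq_getElem?_getD, List.getElem?_take_of_lt hc]
    have hicast : ((t+1 : Nat) : Int) = ((t : Nat) : Int) + 1 := by push_cast; ring
    rw [hicast]
    rw [pv_inner xs t ht prev cur good
          (List.replicate (2*rest.length) (List.replicate (2*m-1) 1)) m hp hclen hg hx]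
    -- regroup and apply the induction hypothesis
    have hregroup : good ++ pvHrow prev :: pvVrow prev cur :: pvHrow cur
            :: List.replicate (2*rest.length) (List.replicate (2*m-1) (1:Int))
        = (good ++ [pvHrow prev, pvVrow prev cur]) ++ pvHrow cur
            :: List.replicate (2*rest.length) (List.replicate (2*m-1) 1) := by
      simp
    rw [hregroup]
    have hcast2 : ((t : Nat) : Int) + 1 + 1 = ((t+1+1 : Nat) : Int) := by push_cast; ring
    have hcast3 : ((t+1+(cur :: rest).length : Nat) : Int) = ((t+1+1+rest.length : Nat) : Int) := by
      simp; omega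
    rw [hcast2, hcast3]
    have := ih (t+1) cur (good ++ [pvHrow prev, pvVrow prev cur]) (by omega)
      (by simp; omega) hclen
      (by intro k hk
          have := hrows (k+1) (by simp; omega)
          have h2 : t + (k+1) = t + 1 + k := by omega
          rw [h2] at this
          simpa using this)
      (by intro k hk
          have := hlen (k+1) (by simp; omega)
          have h2 : t + (k+1) = t + 1 + k := by omega
          rw [h2] at this
          exact this)
    rw [this]
    simp [pvVloop]



-- ===== VERDICT (by name: the statement is the Claim_ definition above) =====
theorem expansao_spec : Claim_equal_expansao := by
  intro xs hdom hpre
  unfold Spec_expansao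
  obtain ⟨hne, hrows⟩ := hpre
  obtain ⟨x0, xr⟩ := xs
  · exact absurd rfl hne
  case cons =>
  rename_i x0 xr
  set m : Nat := x0.length with hm
  -- the B side
  have hBm : PySem.List.len (PySem.List.pyGetD (x0 :: xr) 0 []) = (m : Int) := by
    simp [PySem.List.pyGetD_zero_cons, hm]
  have hB : expansao_alt (x0 :: xr)
      = pvHrow x0 :: pvVloop x0 (xr.map (fun r => r.take m)) := by
    simp only [expansao_alt, hBm, PySem.List.slice_to_natCast, List.map_cons]
    have : x0.take m = x0 := by simp [hm]
    rw [this]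
  rw [hB]
  -- the A side
  simp only [expansao, hBm, PySem.List.len_eq]
  have hN : (x0 :: xr).length = xr.length + 1 := by simp
  -- the initial all-ones grid
  have hones : ∀ z : Nat, (PySem.List.pyRange 0 ((z:Int)*2-1) 1).map
      (fun _ => (1:Int)) = List.replicate (2*z-1) 1 := by
    intro z
    rw [List.map_const']
    congr 1
    rw [PySem.List.length_pyRange_one]
    omega
  have hpix : (PySem.List.pyRange 0 (((x0 :: xr).length : Int)*2-1) 1).map
        (fun _ => (PySem.List.pyRange 0 ((m:Int)*2-1) 1).map (fun _ => (1:Int)))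
      = List.replicate (2*m-1) 1
          :: List.replicate (2*xr.length) (List.replicate (2*m-1) 1) := by
    rw [List.map_const', hones m]
    have hlen : (PySem.List.pyRange 0 (((x0 :: xr).length : Int)*2-1) 1).length
        = 2*(xr.length+1)-1 := by
      rw [PySem.List.length_pyRange_one]
      simp
      omega
    rw [hlen]
    have h2 : 2*(xr.length+1)-1 = (2*xr.length)+1 := by omega
    rw [h2, List.replicate_succ]
  rw [hpix]
  -- peel the outer iteration i = 1
  rw [PySem.List.pyRange_one_cons (a := 1) (b := (((x0 :: xr).length : Int))+1)
        (by simp), List.foldl_cons]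
  -- normalize the inner range bound to a Nat cast
  have hmcast : (m : Int) + 1 = ((m+1 : Nat) : Int) := by push_cast; ring
  simp only [hmcast]
  -- i = 1 fills row 0 with pvHrow x0
  have hx0 : ∀ c : Nat, c < x0.length → pvIGet (x0 :: xr) 0 (c : Int) = x0.getD c 0 := by
    intro c hc
    rw [show (0:Int) = ((0:Nat):Int) from rfl, pvIGet_nat]
    simp
  have h1 := pv_inner1 (x0 :: xr) x0
    (List.replicate (2*xr.length) (List.replicate (2*m-1) 1)) hx0
  rw [show ((x0.length + 1 : Nat) : Int) = ((m+1 : Nat) : Int) from by rw [hm]] at h1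
  rw [show List.replicate (2*x0.length-1) (1:Int) = List.replicate (2*m-1) 1 from by rw [hm]] at h1
  rw [h1]
  -- remaining rows via pv_outer
  have hrest : 2*xr.length = 2*(xr.map (fun r => r.take m)).length := by simp
  rw [show List.replicate (2*xr.length) (List.replicate (2*m-1) (1:Int))
        = List.replicate (2*(xr.map (fun r => r.take m)).length) (List.replicate (2*m-1) 1)
      from by rw [← hrest]]
  have hout := pv_outer (x0 :: xr) m (xr.map (fun r => r.take m)) 1 x0 [] (le_refl 1)
    rfl rfl
    (by intro k hk
        simp at hk
        have hget : (xr.map (fun r => r.take m)).getD k [] = (xr[k]).take m := by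
          rw [List.getD_eq_getElem?_getD, List.getElem?_map, List.getElem?_eq_getElem hk]
          simp
        rw [hget]
        congr 1
        have h2 : (1+k) = k+1 := by omega
        rw [List.getD_eq_getElem?_getD, h2, List.getElem?_cons_succ,
          List.getElem?_eq_getElem hk]
        rfl
      )
    (by intro k hk
        simp at hk
        have hget : ((x0 :: xr).getD (1+k) []) = xr[k] := by
          rw [List.getD_eq_getElem?_getD]
          have : (1+k) = k+1 := by omega
          rw [this]
          simp [List.getElem?_eq_getElem hk]
        rw [hget]
        exact hrows _ (by simp [List.getElem_mem])
      )
  rw [show (((x0 :: xr).length : Int)) + 1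
        = ((1+1+(xr.map (fun r => r.take m)).length : Nat) : Int) from by simp; omega]
  rw [show (1:Int)+1 = ((1+1 : Nat) : Int) from by norm_num]
  simpa using hout
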